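-- pv_equiv track=rewrite | github.com/Ace1928/eidosian_forge | archive_forge/src/archive_forge/func__gray_code_comparator.py | _gray_code_comparator
-- ===== SOURCE A (Python) =====
-- from typing import Any, Dict, Generator, List, Sequence, Tuple
--
-- def _gray_code_comparator(k1: Tuple[int, ...], k2: Tuple[int, ...], flip: bool=False) -> int:
--     """Compares two Gray-encoded binary numbers.
--
--     Args:
--         k1: A tuple of ints, representing the bits that are one. For example, 6 would be (1, 2).
--         k2: The second number, represented similarly as k1.
--         flip: Whether to flip the comparison.
--
--     Returns:
--         -1 if k1 < k2 (or +1 if flip is true)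
--         0 if k1 == k2
--         +1 if k1 > k2 (or -1 if flip is true)
--     """
--     max_1 = k1[-1] if k1 else -1
--     max_2 = k2[-1] if k2 else -1
--     if max_1 != max_2:
--         return -1 if (max_1 < max_2) ^ flip else 1
--     if max_1 == -1:
--         return 0
--     return _gray_code_comparator(k1[0:-1], k2[0:-1], not flip)
-- ===== SOURCE B (Python) =====
-- def _gray_code_comparator(k1, k2, flip=False):
--     i, j = len(k1), len(k2)
--     while True:
--         a = k1[i - 1] if i > 0 else -1
--         b = k2[j - 1] if j > 0 else -1
--         if a != b:
--             return -1 if (a < b) ^ flip else 1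
--         if a == -1:
--             return 0
--         i -= 1
--         j -= 1
--         flip = not flip
-- ===== Notes on version B (the rewrite author's own statement) =====
-- stated objective: faster
-- what changed: Replaces A's recursion that copies both tuples with k[0:-1] at every step by an iterative two-pointer scan from the end that toggles the flip flag, doing no slicing or recursion.
import Mathlib
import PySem

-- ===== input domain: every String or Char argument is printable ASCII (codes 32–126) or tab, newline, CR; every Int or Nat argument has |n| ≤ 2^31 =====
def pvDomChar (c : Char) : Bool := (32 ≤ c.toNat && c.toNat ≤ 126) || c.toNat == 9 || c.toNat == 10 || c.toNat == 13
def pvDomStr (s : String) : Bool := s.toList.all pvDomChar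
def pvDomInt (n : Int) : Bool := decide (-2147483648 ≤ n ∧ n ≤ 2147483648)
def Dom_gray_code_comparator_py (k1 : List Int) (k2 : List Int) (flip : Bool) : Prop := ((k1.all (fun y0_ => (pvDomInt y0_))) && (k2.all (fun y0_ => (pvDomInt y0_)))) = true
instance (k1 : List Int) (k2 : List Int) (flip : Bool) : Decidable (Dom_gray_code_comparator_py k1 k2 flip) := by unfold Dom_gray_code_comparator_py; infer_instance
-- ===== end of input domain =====

-- B replaces A's recursion with per-step tuple slicing by an iterative two-pointer scan
-- from the end (objective: faster).

-- ===== PORT A =====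
-- literal transliteration of A: guarded k[-1] lookups, recursion on k[0:-1] slices
def gray_code_comparator_py (k1 : List Int) (k2 : List Int) (flip : Bool) : Int :=
  let max1 : Int := if k1 ≠ [] then k1.getLast?.getD (-1) else -1   -- k1[-1] if k1 else -1
  let max2 : Int := if k2 ≠ [] then k2.getLast?.getD (-1) else -1
  if max1 ≠ max2 then
    (if (decide (max1 < max2)).xor flip then -1 else 1)
  else if max1 = -1 then 0
  else
    gray_code_comparator_py (PySem.List.slice k1 (some 0) (some (-1)))
      (PySem.List.slice k2 (some 0) (some (-1))) (!flip)
termination_by k1.length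
decreasing_by
  rename_i h1 h2
  simp only [max1] at h2
  have hne : k1 ≠ [] := by
    intro hnil
    simp [hnil] at h2
  have hpos : 0 < k1.length := List.length_pos_iff.mpr hne
  simp only [PySem.List.slice_zero_start, PySem.List.slice_to_neg_one, List.length_dropLast]
  omega

-- ===== PORT B =====
-- B's loop: pointers i, j run from the ends; a/b default to -1 past the front
def grayLoop (k1 : List Int) (k2 : List Int) (i : Nat) (j : Nat) (flip : Bool) : Int :=
  let a : Int := if 0 < i then k1.getD (i - 1) (-1) else -1
  let b : Int := if 0 < j then k2.getD (j - 1) (-1) else -1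
  if a ≠ b then
    (if (decide (a < b)).xor flip then -1 else 1)
  else if a = -1 then 0
  else grayLoop k1 k2 (i - 1) (j - 1) (!flip)
termination_by i
decreasing_by
  rename_i h1 h2
  simp only [a] at h2
  by_contra h
  have hi : i = 0 := by omega
  simp [hi] at h2

def gray_code_comparator_py_alt (k1 : List Int) (k2 : List Int) (flip : Bool) : Int :=
  grayLoop k1 k2 k1.length k2.length flip

-- ===== PRECONDITION & SPEC =====
def Spec_gray_code_comparator_py (k1 : List Int) (k2 : List Int) (flip : Bool) (out : Int) : Prop := out = gray_code_comparator_py_alt k1 k2 flip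
instance (k1 : List Int) (k2 : List Int) (flip : Bool) (out : Int) : Decidable (Spec_gray_code_comparator_py k1 k2 flip out) := by unfold Spec_gray_code_comparator_py; infer_instance

-- ===== CLAIM (what is proved, stated in full; the proofs are below) =====
def Claim_equal_gray_code_comparator_py : Prop := ∀ (k1 : List Int) (k2 : List Int) (flip : Bool), Dom_gray_code_comparator_py k1 k2 flip → Spec_gray_code_comparator_py k1 k2 flip (gray_code_comparator_py k1 k2 flip)

-- ===== LEMMAS AND PROOFS =====

-- the "current element" of B equals the "max" of A's truncated list
theorem gray_elem_eq (l : List Int) (i : Nat) (hi : i ≤ l.length) :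
    (if 0 < i then l.getD (i - 1) (-1) else -1)
      = (if l.take i ≠ [] then (l.take i).getLast?.getD (-1) else -1) := by
  by_cases h : 0 < i
  · have hne : l.take i ≠ [] := by
      intro hnil
      rcases List.take_eq_nil_iff.mp hnil with h0 | h0
      · omega
      · subst h0; simp at hi; omega
    simp only [h, hne, ne_eq, not_false_eq_true, if_true]
    rw [List.getLast?_eq_getElem?]
    have hlen : (l.take i).length = i := by simp; omega
    rw [hlen, List.getElem?_take]
    rw [if_pos (by omega : i - 1 < i)]
    rw [List.getD_eq_getElem?_getD]
  · have hi0 : i = 0 := by omega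
    subst hi0
    simp

theorem grayLoop_eq_take (i : Nat) : ∀ (k1 k2 : List Int) (j : Nat) (flip : Bool),
    i ≤ k1.length → j ≤ k2.length →
    grayLoop k1 k2 i j flip = gray_code_comparator_py (k1.take i) (k2.take j) flip := by
  induction i using Nat.strong_induction_on with
  | _ i ih =>
    intro k1 k2 j flip h1 h2
    rw [grayLoop.eq_def, gray_code_comparator_py.eq_def]
    simp only [← gray_elem_eq k1 i h1, ← gray_elem_eq k2 j h2]
    set a : Int := if 0 < i then k1.getD (i - 1) (-1) else -1 with ha
    set b : Int := if 0 < j then k2.getD (j - 1) (-1) else -1 with hb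
    by_cases hab : a = b
    · simp only [hab, ne_eq, not_true_eq_false, if_false]
      by_cases hneg : b = -1
      · simp [hneg]
      · simp only [hneg, if_false]
        have hi : 0 < i := by
          by_contra h
          have : a = -1 := by simp [ha, Nat.le_zero.mp (Nat.not_lt.mp h)]
          exact hneg (hab ▸ this)
        have hj : 0 < j := by
          by_contra h
          have : b = -1 := by simp [hb, Nat.le_zero.mp (Nat.not_lt.mp h)]
          exact hneg this
        rw [ih (i - 1) (by omega) k1 k2 (j - 1) (!flip) (by omega) (by omega)]
        congr 1 <;>
        · simp only [PySem.List.slice_zero_start, PySem.List.slice_to_neg_one,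
            List.dropLast_eq_take, List.length_take]
          rw [List.take_take]
          congr 1
          omega
    · simp [hab]

-- ===== VERDICT (by name: the statement is the Claim_ definition above) =====
theorem gray_code_comparator_py_spec : Claim_equal_gray_code_comparator_py := by
  intro k1 k2 flip _
  unfold Spec_gray_code_comparator_py gray_code_comparator_py_alt
  rw [grayLoop_eq_take k1.length k1 k2 k2.length flip le_rfl le_rfl]
  simp
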